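-- pv_equiv track=rewrite | github.com/ttvpro007/PythonProblems | labs109.py | winning_card
-- ===== SOURCE A (Python) =====
-- def winning_card(cards, trump = None):
--
--     rank = {'two': 1, 'three': 2, 'four': 3, 'five': 4, 'six': 5, 'seven': 6, 'eight': 7,
--             'nine': 8, 'ten': 9, 'jack': 10, 'queen': 11, 'king': 12, 'ace': 13}
--
--     potential_winning_hands = []
--
--     # set trump as first card played IF
--     # 1 - not already set
--     # or
--     # 2 - the set trump is not in the whole trick
--     if not trump or not trump in [card[1] for card in cards]:
--         trump = cards[0][1]
--
--     for i in range(len(cards)):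
--         if cards[i][1] == trump:
--             potential_winning_hands.append(cards[i])
--
--     if len(potential_winning_hands) == 0:
--         return cards[0]
--
--     # sort the hands descending base on the ranks points
--     potential_winning_hands.sort(key = lambda hand : rank[hand[0]], reverse = True)
--
--     return potential_winning_hands[0]
-- ===== SOURCE B (Python) =====
-- def winning_card(cards, trump = None):
--
--     rank = {'two': 1, 'three': 2, 'four': 3, 'five': 4, 'six': 5, 'seven': 6, 'eight': 7,
--             'nine': 8, 'ten': 9, 'jack': 10, 'queen': 11, 'king': 12, 'ace': 13}
--
--     # same trump resolution: first card's suit when trump is falsy or absent from the trick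
--     if not trump or all(c[1] != trump for c in cards):
--         trump = cards[0][1]
--
--     # single linear scan keeping the first highest-ranked trump card seen so far
--     best = None
--     for c in cards:
--         if c[1] == trump:
--             if best is None or rank[c[0]] > rank[best[0]]:
--                 best = c
--     return best
-- ===== Notes on version B (the rewrite author's own statement) =====
-- stated objective: simpler
-- what changed: Replaces build-list + stable descending sort + take-head with a single running-best scan over the trick (first maximal trump card kept), dropping the dead empty-match branch.
import Mathlib
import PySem

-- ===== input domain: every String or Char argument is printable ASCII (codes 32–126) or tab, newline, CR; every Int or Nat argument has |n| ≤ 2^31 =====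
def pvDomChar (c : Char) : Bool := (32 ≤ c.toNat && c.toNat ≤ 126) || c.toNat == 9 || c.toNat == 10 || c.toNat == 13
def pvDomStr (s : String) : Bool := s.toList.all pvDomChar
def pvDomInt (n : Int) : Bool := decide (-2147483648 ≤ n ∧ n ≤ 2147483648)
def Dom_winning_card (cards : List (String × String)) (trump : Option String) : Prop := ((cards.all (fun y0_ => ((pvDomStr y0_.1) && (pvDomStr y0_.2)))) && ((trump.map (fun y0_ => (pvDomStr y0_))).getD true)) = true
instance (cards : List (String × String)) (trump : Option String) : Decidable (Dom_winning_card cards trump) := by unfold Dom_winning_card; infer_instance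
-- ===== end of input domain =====

-- B replaces A's build-list + stable descending sort + take-head with one linear first-maximal scan (simpler; same results wherever A returns).


-- ===== PORT A =====
-- the literal rank dict of both Pythons
def pvRank : PySem.Dict String Int := PySem.Dict.ofList
  [("two", 1), ("three", 2), ("four", 3), ("five", 4), ("six", 5), ("seven", 6), ("eight", 7),
   ("nine", 8), ("ten", 9), ("jack", 10), ("queen", 11), ("king", 12), ("ace", 13)]

-- rank[hand[0]]; total via default 0 — Pre_ excludes inputs where Python's rank[...] raises KeyError
def pvRankOf (hand : String × String) : Int := pvRank.getD hand.1 0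

-- B's inner conditional: 'if best is None or rank[c[0]] > rank[best[0]]: best = c'
def pvBestStep (best : Option (String × String)) (c : String × String) : Option (String × String) :=
  match best with
  | none => some c
  | some b => if pvRankOf b < pvRankOf c then some c else some b

-- A's trump resolution: 'if not trump or not trump in [card[1] for card in cards]: trump = cards[0][1]'
-- (cards[0] total via pyGetD; Pre_ requires cards ≠ [])
def pvTrumpA (cards : List (String × String)) (trump : Option String) : String :=
  match trump with
  | none => (PySem.List.pyGetD cards 0 ("", "")).2
  | some tr =>
      if tr = "" ∨ ¬ (cards.map (fun card => card.2)).contains tr then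
        (PySem.List.pyGetD cards 0 ("", "")).2
      else tr

def winning_card (cards : List (String × String)) (trump : Option String) : String × String :=
  let t : String := pvTrumpA cards trump
  -- 'for i in range(len(cards)): if cards[i][1] == trump: potential_winning_hands.append(cards[i])'
  let pot : List (String × String) :=
    (PySem.List.pyRange 0 (PySem.List.len cards)).foldl
      (fun acc i =>
        if (PySem.List.pyGetD cards i ("", "")).2 == t then acc ++ [PySem.List.pyGetD cards i ("", "")]
        else acc) []
  if pot.length = 0 then PySem.List.pyGetD cards 0 ("", "")
  else (PySem.List.sorted pot pvRankOf true).headD ("", "")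

-- ===== PORT B =====
-- B's trump resolution: 'if not trump or all(c[1] != trump for c in cards): trump = cards[0][1]'
def pvTrumpB (cards : List (String × String)) (trump : Option String) : String :=
  match trump with
  | none => (PySem.List.pyGetD cards 0 ("", "")).2
  | some tr =>
      if tr = "" ∨ cards.all (fun c => c.2 ≠ tr) then (PySem.List.pyGetD cards 0 ("", "")).2
      else tr

def winning_card_alt (cards : List (String × String)) (trump : Option String) : String × String :=
  let t : String := pvTrumpB cards trump
  -- single scan: keep the first trump card of maximal rank
  let best : Option (String × String) :=
    cards.foldl (fun best c => if c.2 == t then pvBestStep best c else best) none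
  best.getD ("", "")

-- ===== PRECONDITION & SPEC =====
-- Pre_ excludes exactly the inputs where Python A raises: the empty trick (IndexError on cards[0])
-- and tricks where some card of the effective trump suit has a rank name outside the rank dict (KeyError in the sort key).
def Pre_winning_card (cards : List (String × String)) (trump : Option String) : Prop :=
  cards ≠ [] ∧
  ∀ c ∈ cards,
    c.2 = (match trump with
           | none => (cards.headD ("", "")).2
           | some tr => if tr = "" ∨ tr ∉ cards.map (fun card => card.2) then (cards.headD ("", "")).2 else tr) →
    c.1 ∈ ["two", "three", "four", "five", "six", "seven", "eight", "nine", "ten", "jack", "queen", "king", "ace"]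
instance (cards : List (String × String)) (trump : Option String) : Decidable (Pre_winning_card cards trump) := by unfold Pre_winning_card; infer_instance

def pvWitness_winning_card : (List (String × String)) × Option String :=
  ([("two", "S"), ("ace", "S"), ("king", "H")], some "S")

def Spec_winning_card (cards : List (String × String)) (trump : Option String) (out : String × String) : Prop := out = winning_card_alt cards trump
instance (cards : List (String × String)) (trump : Option String) (out : String × String) : Decidable (Spec_winning_card cards trump out) := by unfold Spec_winning_card; infer_instance

-- ===== CLAIM (what is proved, stated in full; the proofs are below) =====
def Claim_equal_winning_card : Prop := ∀ (cards : List (String × String)) (trump : Option String), Dom_winning_card cards trump → Pre_winning_card cards trump → Spec_winning_card cards trump (winning_card cards trump)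

-- ===== LEMMAS AND PROOFS =====

-- the two trump resolutions agree on every input ('tr not in suits' vs 'all suits differ from tr')
theorem pvTrump_eq (cards : List (String × String)) (trump : Option String) :
    pvTrumpA cards trump = pvTrumpB cards trump := by
  unfold pvTrumpA pvTrumpB
  cases trump with
  | none => rfl
  | some tr =>
      dsimp only
      have h : (¬ (cards.map (fun card => card.2)).contains tr) ↔ (cards.all (fun c => c.2 ≠ tr) = true) := by
        rw [List.contains_iff_mem, List.mem_map]
        simp only [List.all_eq_true, decide_eq_true_eq]
        constructor
        · intro h c hc hct; exact h ⟨c, hc, hct⟩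
        · rintro h ⟨c, hc, hct⟩; exact h c hc hct
      by_cases h1 : tr = ""
      · rw [if_pos (Or.inl h1), if_pos (Or.inl h1)]
      · by_cases h2 : ¬ (cards.map (fun card => card.2)).contains tr
        · rw [if_pos (Or.inr h2), if_pos (Or.inr (h.mp h2))]
        · rw [if_neg (by tauto), if_neg (by rw [h] at h2; tauto)]

-- one step of the stable descending insertion sort, seen at the head
theorem pv_insertBy_head? {α κ : Type} [LinearOrder κ] (key : α → κ) (x : α) (acc : List α) :
    (PySem.List.insertBy (fun a b => decide (key b < key a)) x acc).head? =
      (match acc.head? with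
       | none => some x
       | some m => if key m < key x then some x else some m) := by
  cases acc with
  | nil => rfl
  | cons m t =>
      simp only [PySem.List.insertBy, List.head?_cons]
      by_cases h : key m < key x <;> simp [h]

theorem pv_foldl_insertBy_head? {α κ : Type} [LinearOrder κ] (key : α → κ) (xs : List α) (acc : List α) :
    (xs.foldl (fun acc x => PySem.List.insertBy (fun a b => decide (key b < key a)) x acc) acc).head? =
      xs.foldl
        (fun o x =>
          match o with
          | none => some x
          | some m => if key m < key x then some x else some m) acc.head? := by
  induction xs generalizing acc with
  | nil => rfl
  | cons x xs ih => rw [List.foldl_cons, List.foldl_cons, ih, pv_insertBy_head? key x acc]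

-- head of the stable descending sort IS B's running first-maximal scan
theorem pv_head?_sorted_rev {α κ : Type} [LinearOrder κ] (xs : List α) (key : α → κ) :
    (PySem.List.sorted xs key true).head? =
      xs.foldl
        (fun o x =>
          match o with
          | none => some x
          | some m => if key m < key x then some x else some m) none := by
  simp only [PySem.List.sorted]
  exact pv_foldl_insertBy_head? key xs []

-- the common tail of both ports once the effective trump t is fixed and some card matches it
theorem pv_core (cards : List (String × String)) (t : String)
    (h : cards.filter (fun c => c.2 == t) ≠ []) :
    (if ((PySem.List.pyRange 0 (PySem.List.len cards)).foldl
          (fun acc i => if (PySem.List.pyGetD cards i ("", "")).2 == t then acc ++ [PySem.List.pyGetD cards i ("", "")] else acc) []).length = 0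
      then PySem.List.pyGetD cards 0 ("", "")
      else (PySem.List.sorted ((PySem.List.pyRange 0 (PySem.List.len cards)).foldl
          (fun acc i => if (PySem.List.pyGetD cards i ("", "")).2 == t then acc ++ [PySem.List.pyGetD cards i ("", "")] else acc) []) pvRankOf true).headD ("", ""))
    = (cards.foldl (fun best c => if c.2 == t then pvBestStep best c else best) none).getD ("", "") := by
  rw [PySem.List.foldl_pyRange_pyGetD cards ("", "")
        (f := fun acc x => if x.2 == t then acc ++ [x] else acc) (init := ([] : List (String × String))) le_rfl]
  rw [PySem.List.foldl_if_eq_foldl_filter (p := fun c => c.2 == t)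
        (f := pvBestStep) (init := (none : Option (String × String)))]
  simp only [Int.toNat_zero, List.drop_zero, PySem.List.foldl_append_if_eq_filter, List.nil_append]
  rw [if_neg (by simpa using h)]
  rw [List.headD_eq_head?_getD, pv_head?_sorted_rev]
  exact congrArg (fun o => Option.getD o ("", ""))
    (PySem.List.foldl_congr_mem _ _ pvBestStep none (fun acc x _ => by cases acc <;> rfl))

-- ===== VERDICT (by name: the statement is the Claim_ definition above) =====
theorem winning_card_spec : Claim_equal_winning_card := by
  intro cards trump _hdom hpre
  obtain ⟨hne, -⟩ := hpre
  obtain ⟨c0, rest, rfl⟩ : ∃ c0 rest, cards = c0 :: rest := by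
    cases cards with
    | nil => exact absurd rfl hne
    | cons c0 rest => exact ⟨c0, rest, rfl⟩
  have hpot : (c0 :: rest).filter (fun c => c.2 == pvTrumpB (c0 :: rest) trump) ≠ [] := by
    have : ∃ c ∈ c0 :: rest, c.2 = pvTrumpB (c0 :: rest) trump := by
      unfold pvTrumpB
      cases trump with
      | none => exact ⟨c0, by simp, by simp [PySem.List.pyGetD_zero_cons]⟩
      | some tr =>
          dsimp only
          by_cases hc : tr = "" ∨ ((c0 :: rest).all (fun c => c.2 ≠ tr) : Bool)
          · rw [if_pos hc]
            exact ⟨c0, by simp, by simp [PySem.List.pyGetD_zero_cons]⟩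
          · rw [if_neg hc]
            rw [not_or] at hc
            obtain ⟨-, h2⟩ := hc
            simp only [List.all_eq_true, decide_eq_true_eq, not_forall] at h2
            obtain ⟨c, hc', hct⟩ := h2
            exact ⟨c, hc', by simpa using hct⟩
    obtain ⟨c, hc, hct⟩ := this
    intro hfil
    rw [List.filter_eq_nil_iff] at hfil
    exact hfil c hc (by simp [hct])
  unfold Spec_winning_card winning_card winning_card_alt
  simp only [pvTrump_eq]
  exact pv_core (c0 :: rest) (pvTrumpB (c0 :: rest) trump) hpot
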